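-- pv_equiv track=rewrite | github.com/jcolinpatrick/kryptos | scripts/exploration/e_explorer_02_rotation_rk_expanded.py | grid_rotation_perm
-- ===== SOURCE A (Python) =====
-- import math
-- from typing import Dict, List, Optional, Tuple
--
-- def grid_rotation_perm(width: int, length: int, degrees: int) -> Optional[List[int]]:
--     """Generate rotation permutation. Returns None if not bijective."""
--     rows = math.ceil(length / width)
--
--     if degrees == 90:
--         perm = []
--         for new_r in range(width):
--             for new_c in range(rows):
--                 old_r = rows - 1 - new_c
--                 old_c = new_r
--                 old_idx = old_r * width + old_c
--                 if old_idx < length: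
--                     perm.append(old_idx)
--         perm = perm[:length]
--     elif degrees == 180:
--         perm = []
--         for new_r in range(rows):
--             for new_c in range(width):
--                 old_r = rows - 1 - new_r
--                 old_c = width - 1 - new_c
--                 old_idx = old_r * width + old_c
--                 if old_idx < length:
--                     perm.append(old_idx)
--         perm = perm[:length]
--     elif degrees == 270:
--         perm = []
--         for new_r in range(width):
--             for new_c in range(rows):
--                 old_r = new_c
--                 old_c = width - 1 - new_r
--                 old_idx = old_r * width + old_c
--                 if old_idx < length:
--                     perm.append(old_idx)
--         perm = perm[:length]
--     else:
--         return list(range(length))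
--
--     if len(perm) != length or sorted(perm) != list(range(length)):
--         return None
--     return perm
-- ===== SOURCE B (Python) =====
-- import math
-- from typing import List, Optional
--
--
-- def grid_rotation_perm(width: int, length: int, degrees: int) -> Optional[List[int]]:
--     """Generate rotation permutation via 2-D grid rotation. Returns None if not bijective."""
--     rows = math.ceil(length / width)
--     if degrees not in (90, 180, 270):
--         return list(range(length))
--
--     grid = [[r * width + c for c in range(width)] for r in range(rows)]
--     if degrees == 90:
--         rotated = list(zip(*grid[::-1]))
--     elif degrees == 180:
--         rotated = [row[::-1] for row in grid[::-1]]
--     else: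
--         rotated = list(zip(*grid))[::-1]
--
--     perm = [idx for row in rotated for idx in row if idx < length]
--
--     if len(perm) != length or sorted(perm) != list(range(length)):
--         return None
--     return perm
-- ===== Notes on version B (the rewrite author's own statement) =====
-- stated objective: idiomatic
-- what changed: B builds the old-index grid as a 2-D list and rotates it with zip(*grid[::-1]) / reversed-row slicing / zip-then-reverse, then flattens and filters, instead of A's three hand-indexed nested loops computing old_r/old_c per cell.
import Mathlib
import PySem

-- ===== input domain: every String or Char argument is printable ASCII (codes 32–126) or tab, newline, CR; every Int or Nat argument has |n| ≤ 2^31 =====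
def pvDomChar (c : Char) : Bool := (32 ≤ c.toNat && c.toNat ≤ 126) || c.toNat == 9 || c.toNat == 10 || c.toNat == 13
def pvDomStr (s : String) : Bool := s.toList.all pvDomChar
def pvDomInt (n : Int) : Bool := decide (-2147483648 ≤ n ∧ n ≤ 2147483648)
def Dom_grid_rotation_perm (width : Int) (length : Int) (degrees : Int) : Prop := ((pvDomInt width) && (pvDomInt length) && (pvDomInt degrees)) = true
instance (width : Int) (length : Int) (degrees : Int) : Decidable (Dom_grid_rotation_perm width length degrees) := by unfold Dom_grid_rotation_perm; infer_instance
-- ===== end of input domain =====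

-- B replaces A's three hand-indexed double loops by building the index grid as a 2-D list and rotating it with zip/reverse (idiomatic; same cost).


-- ===== PORT A =====
-- math.ceil(length / width) is ported as -((-length) // width); exact on Dom (|length|,|width| ≤ 2^31:
-- the correctly rounded float quotient cannot cross an integer boundary at these magnitudes).
def grid_rotation_perm (width : Int) (length : Int) (degrees : Int) : Option (List Int) :=
  let rows : Int := -(PySem.Int.floordiv (-length) width)
  if degrees = 90 then
    let perm : List Int := (PySem.List.pyRange 0 width 1).foldl (fun acc new_r =>
      (PySem.List.pyRange 0 rows 1).foldl (fun acc2 new_c =>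
        let old_r := rows - 1 - new_c
        let old_c := new_r
        let old_idx := old_r * width + old_c
        if old_idx < length then acc2 ++ [old_idx] else acc2) acc) []
    let perm := PySem.List.slice perm none (some length)
    if (perm.length : Int) ≠ length ∨ PySem.List.sorted perm (fun x => x) false ≠ PySem.List.pyRange 0 length 1 then none
    else some perm
  else if degrees = 180 then
    let perm : List Int := (PySem.List.pyRange 0 rows 1).foldl (fun acc new_r =>
      (PySem.List.pyRange 0 width 1).foldl (fun acc2 new_c =>
        let old_r := rows - 1 - new_r
        let old_c := width - 1 - new_c
        let old_idx := old_r * width + old_c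
        if old_idx < length then acc2 ++ [old_idx] else acc2) acc) []
    let perm := PySem.List.slice perm none (some length)
    if (perm.length : Int) ≠ length ∨ PySem.List.sorted perm (fun x => x) false ≠ PySem.List.pyRange 0 length 1 then none
    else some perm
  else if degrees = 270 then
    let perm : List Int := (PySem.List.pyRange 0 width 1).foldl (fun acc new_r =>
      (PySem.List.pyRange 0 rows 1).foldl (fun acc2 new_c =>
        let old_r := new_c
        let old_c := width - 1 - new_r
        let old_idx := old_r * width + old_c
        if old_idx < length then acc2 ++ [old_idx] else acc2) acc) []
    let perm := PySem.List.slice perm none (some length)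
    if (perm.length : Int) ≠ length ∨ PySem.List.sorted perm (fun x => x) false ≠ PySem.List.pyRange 0 length 1 then none
    else some perm
  else
    some (PySem.List.pyRange 0 length 1)

-- ===== PORT B =====
-- zip(*l): tuples truncated to the shortest row; exact transcription of Python's zip over lists
def pyZipStar (l : List (List Int)) : List (List Int) :=
  match l with
  | [] => []
  | [xs] => xs.map (fun x => [x])
  | xs :: rest => List.zipWith (fun x r => x :: r) xs (pyZipStar rest)

-- the common tail of B: flatten the rotated grid keeping indices < length, then the bijectivity check
def pvTailCheck (length : Int) (rotated : List (List Int)) : Option (List Int) :=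
  let perm : List Int := rotated.flatMap (fun row => row.filter (fun idx => decide (idx < length)))
  if (perm.length : Int) ≠ length ∨ PySem.List.sorted perm (fun x => x) false ≠ PySem.List.pyRange 0 length 1 then none
  else some perm

def grid_rotation_perm_alt (width : Int) (length : Int) (degrees : Int) : Option (List Int) :=
  let rows : Int := -(PySem.Int.floordiv (-length) width)
  if degrees ≠ 90 ∧ degrees ≠ 180 ∧ degrees ≠ 270 then
    some (PySem.List.pyRange 0 length 1)
  else
    let grid : List (List Int) := (PySem.List.pyRange 0 rows 1).map (fun r =>
      (PySem.List.pyRange 0 width 1).map (fun c => r * width + c))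
    if degrees = 90 then
      pvTailCheck length (pyZipStar grid.reverse)
    else if degrees = 180 then
      pvTailCheck length (grid.reverse.map List.reverse)
    else
      pvTailCheck length (pyZipStar grid).reverse

-- ===== PRECONDITION & SPEC =====
-- Pre_ excludes exactly width = 0, where Python's length / width raises ZeroDivisionError.
def Pre_grid_rotation_perm (width : Int) (length : Int) (degrees : Int) : Prop := width ≠ 0
instance (width : Int) (length : Int) (degrees : Int) : Decidable (Pre_grid_rotation_perm width length degrees) := by unfold Pre_grid_rotation_perm; infer_instance
def pvWitness_grid_rotation_perm : Int × Int × Int := (3, 7, 90)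

def Spec_grid_rotation_perm (width : Int) (length : Int) (degrees : Int) (out : Option (List Int)) : Prop := out = grid_rotation_perm_alt width length degrees
instance (width : Int) (length : Int) (degrees : Int) (out : Option (List Int)) : Decidable (Spec_grid_rotation_perm width length degrees out) := by unfold Spec_grid_rotation_perm; infer_instance

-- ===== CLAIM (what is proved, stated in full; the proofs are below) =====
def Claim_equal_grid_rotation_perm : Prop := ∀ (width : Int) (length : Int) (degrees : Int), Dom_grid_rotation_perm width length degrees → Pre_grid_rotation_perm width length degrees → Spec_grid_rotation_perm width length degrees (grid_rotation_perm width length degrees)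

-- ===== LEMMAS AND PROOFS =====

-- (range n).reverse enumerated forwards
lemma pv_rev_range (n : ℕ) : (List.range n).reverse = (List.range n).map (fun k => n - 1 - k) := by
  apply List.ext_getElem (by simp)
  intro i h1 h2
  simp [List.getElem_reverse]

-- the inner Python loop: append old_idx when it is < L
lemma pv_inner_fold (inn : List Int) (h : Int → Int) (L : Int) (acc : List Int) :
    inn.foldl (fun acc2 y => if h y < L then acc2 ++ [h y] else acc2) acc
      = acc ++ (inn.map h).filter (fun v => decide (v < L)) := by
  induction inn generalizing acc with
  | nil => simp
  | cons y ys ih =>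
    simp only [List.foldl_cons, List.map_cons, List.filter_cons]
    by_cases hy : h y < L
    · rw [if_pos hy, ih]; simp [hy]
    · rw [if_neg hy, ih]; simp [hy]

-- the nested A-side loop as a flatMap of filtered rows
lemma pv_outer_fold (out inn : List Int) (g : Int → Int → Int) (L : Int) :
    out.foldl (fun acc x => inn.foldl (fun acc2 y => if g x y < L then acc2 ++ [g x y] else acc2) acc) []
      = out.flatMap (fun x => (inn.map (g x)).filter (fun v => decide (v < L))) := by
  suffices h : ∀ acc, out.foldl (fun acc x => inn.foldl (fun acc2 y => if g x y < L then acc2 ++ [g x y] else acc2) acc) acc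
      = acc ++ out.flatMap (fun x => (inn.map (g x)).filter (fun v => decide (v < L))) by
    simpa using h []
  induction out with
  | nil => simp
  | cons x xs ih =>
    intro acc
    simp only [List.foldl_cons, List.flatMap_cons]
    rw [pv_inner_fold, ih, List.append_assoc]

-- zip(*rows) of a rectangular grid of rows (range m).map g
lemma pv_zipStar_rows (m : ℕ) (gs : List (ℕ → Int)) (hne : gs ≠ []) :
    pyZipStar (gs.map (fun g => (List.range m).map g)) = (List.range m).map (fun c => gs.map (fun g => g c)) := by
  induction gs with
  | nil => exact absurd rfl hne
  | cons g rest ih =>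
    cases rest with
    | nil => simp [pyZipStar, List.map_map]
    | cons g2 t =>
      have h2 : (g2 :: t : List (ℕ → Int)) ≠ [] := by simp
      show List.zipWith (fun x r => x :: r) ((List.range m).map g)
          (pyZipStar ((g2 :: t).map (fun g => (List.range m).map g))) = _
      rw [ih h2, List.zipWith_map, List.zipWith_self]
      simp

-- zip(*rows) when every row is empty
lemma pv_zipStar_nils (l : List (List Int)) (h : ∀ r ∈ l, r = []) : pyZipStar l = [] := by
  cases l with
  | nil => rfl
  | cons xs rest =>
    have hxs : xs = [] := h xs (by simp)
    cases rest with
    | nil => simp [pyZipStar, hxs]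
    | cons b t => rw [hxs]; rfl

-- a Nodup list of ints in [0, L) has at most L.toNat elements; here for the canonical flatMap form,
-- with σ a row signature separating the rows
lemma pv_len_le (n m : ℕ) (g : ℕ → ℕ → Int) (L : Int) (σ : Int → ℕ)
    (hinj : ∀ x a b, a < m → b < m → g x a = g x b → a = b)
    (hσ : ∀ x y, x < n → y < m → σ (g x y) = x)
    (hnn : ∀ x y, x < n → y < m → 0 ≤ g x y) :
    ((List.range n).flatMap (fun x => ((List.range m).map (fun y => g x y)).filter
        (fun v => decide (v < L)))).length ≤ L.toNat := by
  set C := (List.range n).flatMap (fun x => ((List.range m).map (fun y => g x y)).filter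
        (fun v => decide (v < L))) with hC
  have hmemrow : ∀ x v, x < n →
      v ∈ ((List.range m).map (fun y => g x y)).filter (fun u => decide (u < L)) →
      (0 ≤ v ∧ v < L) ∧ σ v = x := by
    intro x v hx hv
    rcases List.mem_filter.mp hv with ⟨hvm, hvlt⟩
    rcases List.mem_map.mp hvm with ⟨y, hy, hyv⟩
    have hym := List.mem_range.mp hy
    subst hyv
    exact ⟨⟨hnn x y hx hym, of_decide_eq_true hvlt⟩, hσ x y hx hym⟩
  have hnd : C.Nodup := by
    rw [hC, List.nodup_flatMap]
    constructor
    · intro x hx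
      apply List.Nodup.filter
      apply List.Nodup.map_on ?_ List.nodup_range
      intro a ha b hb hab
      exact hinj x a b (List.mem_range.mp ha) (List.mem_range.mp hb) hab
    · apply List.Pairwise.imp_of_mem ?_ List.pairwise_lt_range
      intro a b ha hb hlt v hva hvb
      have h1 := (hmemrow a v (List.mem_range.mp ha) hva).2
      have h2 := (hmemrow b v (List.mem_range.mp hb) hvb).2
      omega
  have hmem : ∀ v ∈ C, 0 ≤ v ∧ v < L := by
    intro v hv
    rcases List.mem_flatMap.mp hv with ⟨x, hx, hvx⟩
    exact (hmemrow x v (List.mem_range.mp hx) hvx).1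
  calc C.length = C.toFinset.card := (List.toFinset_card_of_nodup hnd).symm
    _ ≤ (Finset.Ico (0 : ℤ) L).card := by
        apply Finset.card_le_card
        intro v hv
        rcases hmem v (List.mem_toFinset.mp hv) with ⟨h0, h1⟩
        exact Finset.mem_Ico.mpr ⟨h0, h1⟩
    _ = L.toNat := by rw [Int.card_Ico]; simp

-- slice of [] is []
lemma pv_slice_nil (b : Int) : PySem.List.slice ([] : List Int) none (some b) = [] := by
  simp [PySem.List.slice]

-- ceiling-division bounds in the main case
lemma pv_rows_bounds (W L : Int) (hW : 0 < W) :
    (-(PySem.Int.floordiv (-L) W) - 1) * W < L ∧ L ≤ -(PySem.Int.floordiv (-L) W) * W :=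
  (PySem.Int.neg_floordiv_neg_eq_iff_of_pos hW).mp rfl

lemma pv_rows_nonpos_of (W L : Int) (hW : 0 < W) (hL : L ≤ 0) :
    -(PySem.Int.floordiv (-L) W) ≤ 0 := by
  rw [PySem.Int.floordiv_eq_ediv_of_pos hW]
  have : 0 ≤ (-L) / W := Int.ediv_nonneg (by omega) hW.le
  omega

lemma pv_pyRange_cast (b : Int) : PySem.List.pyRange 0 b = (List.range b.toNat).map (fun k : ℕ => (k : ℤ)) := by
  rw [PySem.List.pyRange_one]; simp

lemma pv_flatMap_congr {α β : Type} (l : List α) (f g : α → List β) (h : ∀ a ∈ l, f a = g a) :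
    l.flatMap f = l.flatMap g := by
  induction l with
  | nil => rfl
  | cons a as ih =>
    simp only [List.flatMap_cons]
    rw [h a (by simp), ih (fun a ha => h a (by simp [ha]))]

lemma pv_zipStar_range (m n : ℕ) (hn : 0 < n) (F : ℕ → ℕ → Int) :
    pyZipStar ((List.range n).map (fun k => (List.range m).map (F k)))
      = (List.range m).map (fun c => (List.range n).map (fun k => F k c)) := by
  have h := pv_zipStar_rows m ((List.range n).map F) (by simp; omega)
  rw [List.map_map] at h
  simpa [List.map_map, Function.comp_def] using h

lemma pv_key90 (W L R : Int) (hW : W ≠ 0) (hR : R = -(PySem.Int.floordiv (-L) W)) :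
    PySem.List.slice
      (List.flatMap (fun x => List.filter (fun v => decide (v < L))
          (List.map (fun y => (R - 1 - y) * W + x) (PySem.List.pyRange 0 R)))
        (PySem.List.pyRange 0 W)) none (some L)
    = List.flatMap (fun row => List.filter (fun idx => decide (idx < L)) row)
        (pyZipStar (List.map (fun r => List.map (fun c => r * W + c) (PySem.List.pyRange 0 W))
            (PySem.List.pyRange 0 R)).reverse) := by
  by_cases hWL : 0 < W ∧ 0 < L
  · obtain ⟨hWpos, hLpos⟩ := hWL
    have hb := pv_rows_bounds W L hWpos
    rw [← hR] at hb
    have hRpos : 0 < R := by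
      by_contra hc
      have hc2 : R ≤ 0 := by omega
      nlinarith [hb.2, mul_nonneg (neg_nonneg.mpr hc2) hWpos.le]
    rw [pv_pyRange_cast W, pv_pyRange_cast R]
    simp only [List.flatMap_map, List.map_map, Function.comp_def]
    rw [PySem.List.slice_to _ hLpos.le]
    rw [List.take_of_length_le (pv_len_le W.toNat R.toNat (fun x y => (R - 1 - (y:ℤ)) * W + (x:ℤ)) L
        (fun v => (v % W).toNat)
        (by
          intro x a b ha hb hab
          dsimp only at hab
          have h1 : ((R - 1 - (a:ℤ)) * W) = ((R - 1 - (b:ℤ)) * W) := by omega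
          have h2 := mul_right_cancel₀ hW h1
          omega)
        (by
          intro x y hx hy
          dsimp only
          have hxW : (x : ℤ) < W := by omega
          rw [show (R - 1 - (y:ℤ)) * W + (x:ℤ) = (x:ℤ) + (R - 1 - (y:ℤ)) * W from by ring,
            Int.add_mul_emod_self_right, Int.emod_eq_of_lt (by omega) hxW]
          omega)
        (by
          intro x y hx hy
          dsimp only
          have hyR : (y : ℤ) < R := by omega
          have h3 : 0 ≤ (R - 1 - (y:ℤ)) * W := mul_nonneg (by omega) (by omega)
          omega))]
    rw [← List.map_reverse, pv_rev_range, List.map_map]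
    simp only [Function.comp_def]
    rw [pv_zipStar_range W.toNat R.toNat (by omega)]
    rw [List.flatMap_map]
    apply pv_flatMap_congr
    intro c hc
    congr 1
    apply List.map_congr_left
    intro k hk
    have hk' := List.mem_range.mp hk
    have hcast : (↑(R.toNat - 1 - k) : ℤ) = R - 1 - (k : ℤ) := by omega
    rw [hcast]
  · have hA : PySem.List.pyRange 0 W = [] ∨ PySem.List.pyRange 0 R = [] := by
      rcases lt_or_gt_of_ne hW with hneg | hpos
      · exact Or.inl (PySem.List.pyRange_one_eq_nil (by omega))
      · refine Or.inr (PySem.List.pyRange_one_eq_nil ?_)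
        have := pv_rows_nonpos_of W L hpos (by omega)
        omega
    rcases hA with hA | hA
    · rw [hA]
      simp only [List.flatMap_nil, List.map_nil]
      rw [pv_slice_nil]
      rw [pv_zipStar_nils ((List.map (fun r => ([] : List ℤ)) (PySem.List.pyRange 0 R)).reverse)
        (by intro r hr; rw [List.mem_reverse] at hr; rcases List.mem_map.mp hr with ⟨a, _, h⟩; exact h.symm)]
      rfl
    · rw [hA]
      simp only [List.map_nil, List.filter_nil]
      rw [show List.flatMap (fun x : ℤ => ([] : List ℤ)) (PySem.List.pyRange 0 W) = [] from by simp,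
        pv_slice_nil]
      rfl

lemma pv_key180 (W L R : Int) (hW : W ≠ 0) (hR : R = -(PySem.Int.floordiv (-L) W)) :
    PySem.List.slice
      (List.flatMap (fun x => List.filter (fun v => decide (v < L))
          (List.map (fun y => (R - 1 - x) * W + (W - 1 - y)) (PySem.List.pyRange 0 W)))
        (PySem.List.pyRange 0 R)) none (some L)
    = List.flatMap (fun row => List.filter (fun idx => decide (idx < L)) row)
        (List.map List.reverse (List.map (fun r => List.map (fun c => r * W + c) (PySem.List.pyRange 0 W))
            (PySem.List.pyRange 0 R)).reverse) := by
  by_cases hWL : 0 < W ∧ 0 < L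
  · obtain ⟨hWpos, hLpos⟩ := hWL
    have hb := pv_rows_bounds W L hWpos
    rw [← hR] at hb
    have hRpos : 0 < R := by
      by_contra hc
      have hc2 : R ≤ 0 := by omega
      nlinarith [hb.2, mul_nonneg (neg_nonneg.mpr hc2) hWpos.le]
    rw [pv_pyRange_cast W, pv_pyRange_cast R]
    simp only [List.flatMap_map, List.map_map, Function.comp_def]
    rw [PySem.List.slice_to _ hLpos.le]
    rw [List.take_of_length_le (pv_len_le R.toNat W.toNat (fun x y => (R - 1 - (x:ℤ)) * W + (W - 1 - (y:ℤ))) L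
        (fun v => (R - 1 - v / W).toNat)
        (by
          intro x a b ha hb hab
          dsimp only at hab
          have h1 := add_left_cancel hab
          omega)
        (by
          intro x y hx hy
          dsimp only
          rw [show (R - 1 - (x:ℤ)) * W + (W - 1 - (y:ℤ)) = (W - 1 - (y:ℤ)) + (R - 1 - (x:ℤ)) * W from by ring,
            Int.add_mul_ediv_right _ _ hW, Int.ediv_eq_zero_of_lt (by omega) (by omega)]
          omega)
        (by
          intro x y hx hy
          dsimp only
          have h3 : 0 ≤ (R - 1 - (x:ℤ)) * W := mul_nonneg (by omega) (by omega)
          omega))]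
    simp only [← List.map_reverse, pv_rev_range, List.map_map, Function.comp_def]
    rw [List.flatMap_map]
    apply pv_flatMap_congr
    intro k hk
    have hk' := List.mem_range.mp hk
    congr 1
    rw [← List.map_reverse, pv_rev_range, List.map_map]
    apply List.map_congr_left
    intro j hj
    have hj' := List.mem_range.mp hj
    simp only [Function.comp_def]
    have hc1 : (↑(R.toNat - 1 - k) : ℤ) = R - 1 - (k : ℤ) := by omega
    have hc2 : (↑(W.toNat - 1 - j) : ℤ) = W - 1 - (j : ℤ) := by omega
    rw [hc1, hc2]
  · have hA : PySem.List.pyRange 0 W = [] ∨ PySem.List.pyRange 0 R = [] := by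
      rcases lt_or_gt_of_ne hW with hneg | hpos
      · exact Or.inl (PySem.List.pyRange_one_eq_nil (by omega))
      · refine Or.inr (PySem.List.pyRange_one_eq_nil ?_)
        have := pv_rows_nonpos_of W L hpos (by omega)
        omega
    rcases hA with hA | hA
    · rw [hA]
      simp only [List.map_nil, List.filter_nil]
      rw [show List.flatMap (fun x : ℤ => ([] : List ℤ)) (PySem.List.pyRange 0 R) = [] from by simp,
        pv_slice_nil]
      simp
    · rw [hA]
      simp only [List.flatMap_nil, List.map_nil, List.reverse_nil]
      rw [pv_slice_nil]

lemma pv_key270 (W L R : Int) (hW : W ≠ 0) (hR : R = -(PySem.Int.floordiv (-L) W)) :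
    PySem.List.slice
      (List.flatMap (fun x => List.filter (fun v => decide (v < L))
          (List.map (fun y => y * W + (W - 1 - x)) (PySem.List.pyRange 0 R)))
        (PySem.List.pyRange 0 W)) none (some L)
    = List.flatMap (fun row => List.filter (fun idx => decide (idx < L)) row)
        (pyZipStar (List.map (fun r => List.map (fun c => r * W + c) (PySem.List.pyRange 0 W))
            (PySem.List.pyRange 0 R))).reverse := by
  by_cases hWL : 0 < W ∧ 0 < L
  · obtain ⟨hWpos, hLpos⟩ := hWL
    have hb := pv_rows_bounds W L hWpos
    rw [← hR] at hb
    have hRpos : 0 < R := by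
      by_contra hc
      have hc2 : R ≤ 0 := by omega
      nlinarith [hb.2, mul_nonneg (neg_nonneg.mpr hc2) hWpos.le]
    rw [pv_pyRange_cast W, pv_pyRange_cast R]
    simp only [List.flatMap_map, List.map_map, Function.comp_def]
    rw [PySem.List.slice_to _ hLpos.le]
    rw [List.take_of_length_le (pv_len_le W.toNat R.toNat (fun x y => (y:ℤ) * W + (W - 1 - (x:ℤ))) L
        (fun v => (W - 1 - v % W).toNat)
        (by
          intro x a b ha hb hab
          dsimp only at hab
          have h1 := add_right_cancel hab
          have h2 := mul_right_cancel₀ hW h1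
          omega)
        (by
          intro x y hx hy
          dsimp only
          rw [show (y:ℤ) * W + (W - 1 - (x:ℤ)) = (W - 1 - (x:ℤ)) + (y:ℤ) * W from by ring,
            Int.add_mul_emod_self_right, Int.emod_eq_of_lt (by omega) (by omega)]
          omega)
        (by
          intro x y hx hy
          dsimp only
          have h3 : 0 ≤ (y:ℤ) * W := mul_nonneg (by omega) (by omega)
          omega))]
    rw [pv_zipStar_range W.toNat R.toNat (by omega)]
    rw [← List.map_reverse, pv_rev_range, List.map_map]
    simp only [Function.comp_def]
    rw [List.flatMap_map]
    apply pv_flatMap_congr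
    intro x hx
    have hx' := List.mem_range.mp hx
    congr 1
    apply List.map_congr_left
    intro k hk
    have hk' := List.mem_range.mp hk
    have hc1 : (↑(W.toNat - 1 - x) : ℤ) = W - 1 - (x : ℤ) := by omega
    rw [hc1]
  · have hA : PySem.List.pyRange 0 W = [] ∨ PySem.List.pyRange 0 R = [] := by
      rcases lt_or_gt_of_ne hW with hneg | hpos
      · exact Or.inl (PySem.List.pyRange_one_eq_nil (by omega))
      · refine Or.inr (PySem.List.pyRange_one_eq_nil ?_)
        have := pv_rows_nonpos_of W L hpos (by omega)
        omega
    rcases hA with hA | hA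
    · rw [hA]
      simp only [List.flatMap_nil, List.map_nil]
      rw [pv_slice_nil]
      rw [pv_zipStar_nils (List.map (fun r => ([] : List ℤ)) (PySem.List.pyRange 0 R))
        (by intro r hr; rcases List.mem_map.mp hr with ⟨a, _, h⟩; exact h.symm)]
      rfl
    · rw [hA]
      simp only [List.map_nil, List.filter_nil]
      rw [show List.flatMap (fun x : ℤ => ([] : List ℤ)) (PySem.List.pyRange 0 W) = [] from by simp,
        pv_slice_nil]
      rfl

lemma pv_case90 (W L : Int) (hW : W ≠ 0) :
    grid_rotation_perm W L 90 = grid_rotation_perm_alt W L 90 := by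
  simp only [grid_rotation_perm, grid_rotation_perm_alt, pvTailCheck, Int.reduceEq, ne_eq, reduceIte,
    not_true_eq_false, not_false_eq_true, false_and, true_and, and_true, and_self]
  rw [pv_outer_fold, pv_key90 W L _ hW rfl]

lemma pv_case180 (W L : Int) (hW : W ≠ 0) :
    grid_rotation_perm W L 180 = grid_rotation_perm_alt W L 180 := by
  simp only [grid_rotation_perm, grid_rotation_perm_alt, pvTailCheck, Int.reduceEq, ne_eq, reduceIte,
    not_true_eq_false, not_false_eq_true, false_and, true_and, and_true, and_self]
  rw [pv_outer_fold, pv_key180 W L _ hW rfl]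

lemma pv_case270 (W L : Int) (hW : W ≠ 0) :
    grid_rotation_perm W L 270 = grid_rotation_perm_alt W L 270 := by
  simp only [grid_rotation_perm, grid_rotation_perm_alt, pvTailCheck, Int.reduceEq, ne_eq, reduceIte,
    not_true_eq_false, not_false_eq_true, false_and, true_and, and_true, and_self]
  rw [pv_outer_fold, pv_key270 W L _ hW rfl]

-- ===== VERDICT (by name: the statement is the Claim_ definition above) =====
theorem grid_rotation_perm_spec : Claim_equal_grid_rotation_perm := by
  intro W L d _ hpre
  have hW : W ≠ 0 := hpre
  unfold Spec_grid_rotation_perm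
  by_cases h1 : d = 90
  · subst h1; exact pv_case90 W L hW
  by_cases h2 : d = 180
  · subst h2; exact pv_case180 W L hW
  by_cases h3 : d = 270
  · subst h3; exact pv_case270 W L hW
  simp [grid_rotation_perm, grid_rotation_perm_alt, h1, h2, h3]
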